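-- pv_equiv track=rewrite | github.com/he-h/COVID-Mobility-Network-Analysis | model.py | l_sl_value
-- ===== SOURCE A (Python) =====
-- def l_sl_value(li):
--     if len(li) == 0:
--         return 0,0
--     l = [i for i, j in enumerate(li) if j == max(li)][0]
--     sublist = li[:l]
--     if l == 0:
--         sl = 0
--     else:
--         sl = [i for i, j in enumerate(sublist) if j == max(sublist)][0]
--
--     return l, sl
-- ===== SOURCE B (Python) =====
-- def l_sl_value(li):
--     if not li:
--         return 0, 0
--     best_val = li[0]
--     best_idx = 0
--     prev_idx = 0
--     i = 1
--     for x in li[1:]: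
--         if x > best_val:
--             prev_idx = best_idx
--             best_val = x
--             best_idx = i
--         i += 1
--     return best_idx, prev_idx
-- ===== Notes on version B (the rewrite author's own statement) =====
-- stated objective: faster
-- what changed: Replaced repeated max() scans and two enumerate/filter comprehensions with a single left-to-right pass that tracks the running max's first index and the previous running max's first index.
import Mathlib
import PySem

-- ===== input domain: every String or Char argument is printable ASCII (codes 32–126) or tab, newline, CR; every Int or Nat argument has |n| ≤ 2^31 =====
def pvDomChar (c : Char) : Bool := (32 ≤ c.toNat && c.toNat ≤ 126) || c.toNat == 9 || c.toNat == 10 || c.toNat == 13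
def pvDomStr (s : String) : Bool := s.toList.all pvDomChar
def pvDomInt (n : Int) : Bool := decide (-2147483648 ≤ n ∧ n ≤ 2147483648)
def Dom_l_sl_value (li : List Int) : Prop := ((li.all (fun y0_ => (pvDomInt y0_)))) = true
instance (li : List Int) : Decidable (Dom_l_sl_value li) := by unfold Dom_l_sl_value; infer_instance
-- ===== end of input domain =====

-- B replaces A's repeated max() rescans and filter comprehensions by one left-to-right pass
-- tracking the running max's first index and the previous running max's first index (objective: faster).


-- ===== PORT A =====
-- l = [i for i, j in enumerate(li) if j == max(li)][0]; Python never hits an empty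
-- comprehension here (max(li) ∈ li), so the [0] is ported as pyGet? … 0 |>.getD 0.
def l_sl_value (li : List Int) : Int × Int :=
  if PySem.List.len li = 0 then (0, 0)
  else
    let m := (PySem.List.max? li (fun x => x)).getD 0
    let l := (PySem.List.pyGet?
      (((PySem.List.enumerate li 0).filter (fun p => p.2 == m)).map Prod.fst) 0).getD 0
    let sublist := PySem.List.slice li none (some l)
    let sl :=
      if l = 0 then (0 : Int)
      else
        let m2 := (PySem.List.max? sublist (fun x => x)).getD 0
        (PySem.List.pyGet?
          (((PySem.List.enumerate sublist 0).filter (fun p => p.2 == m2)).map Prod.fst) 0).getD 0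
    (l, sl)

-- ===== PORT B =====
-- single pass: state (best_val, best_idx, prev_idx, i) over the tail of the list
def altLoop : List Int → Int → Int → Int → Int → Int × Int
  | [], _, bi, pi, _ => (bi, pi)
  | x :: xs, bv, bi, pi, i =>
      if bv < x then altLoop xs x i bi (i + 1)
      else altLoop xs bv bi pi (i + 1)

def l_sl_value_alt (li : List Int) : Int × Int :=
  match li with
  | [] => (0, 0)
  | x :: xs => altLoop xs x 0 0 1

-- ===== PRECONDITION & SPEC =====
def Spec_l_sl_value (li : List Int) (out : Int × Int) : Prop := out = l_sl_value_alt li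
instance (li : List Int) (out : Int × Int) : Decidable (Spec_l_sl_value li out) := by unfold Spec_l_sl_value; infer_instance

-- ===== CLAIM (what is proved, stated in full; the proofs are below) =====
def Claim_equal_l_sl_value : Prop := ∀ (li : List Int), Dom_l_sl_value li → Spec_l_sl_value li (l_sl_value li)

-- ===== LEMMAS AND PROOFS =====

-- leftmost index of the maximum of a :: t
def fIdx : Int → List Int → Nat
  | _, [] => 0
  | a, x :: xs => if a < xs.foldl max x then fIdx x xs + 1 else 0

lemma foldl_max_comm (xs : List Int) : ∀ a b : Int, xs.foldl max (max a b) = max a (xs.foldl max b) := by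
  induction xs with
  | nil => intro a b; simp
  | cons x xs ih => intro a b; simp only [List.foldl_cons]; rw [max_assoc, ih]

-- prepending an element ≤ a shifts the leftmost-max index unless it stays 0
lemma fIdx_cons_le (a x : Int) (P : List Int) (hx : x ≤ a) :
    fIdx a (x :: P) = if fIdx a P = 0 then 0 else fIdx a P + 1 := by
  cases P with
  | nil => simp [fIdx, not_lt.mpr hx]
  | cons y ys =>
    have hc : (y :: ys).foldl max x = max x (ys.foldl max y) := by
      simpa using foldl_max_comm ys x y
    by_cases hN : a < ys.foldl max y
    · have hx' : x < ys.foldl max y := lt_of_le_of_lt hx hN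
      simp only [fIdx, hc, if_pos (lt_max_iff.mpr (Or.inr hN)), if_pos hx', if_pos hN]
      simp
    · have h1 : ¬ a < max x (ys.foldl max y) := not_lt.mpr (max_le hx (not_lt.mp hN))
      simp only [fIdx, hc, if_neg h1, if_neg hN]
      simp

-- A's comprehension head equals the leftmost-max index
lemma filter_head_eq (t : List Int) : ∀ (a s : Int),
    (PySem.List.pyGet?
      (((PySem.List.enumerate (a :: t) s).filter (fun p => p.2 == t.foldl max a)).map Prod.fst) 0).getD 0
      = s + (fIdx a t : Int) := by
  induction t with
  | nil =>
    intro a s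
    simp [PySem.List.enumerate_cons, PySem.List.enumerate_nil, fIdx]
  | cons x xs ih =>
    intro a s
    have hM : (x :: xs).foldl max a = max a (xs.foldl max x) := by
      simpa using foldl_max_comm xs a x
    rw [PySem.List.enumerate_cons]
    by_cases h : a < xs.foldl max x
    · have hmax : max a (xs.foldl max x) = xs.foldl max x := max_eq_right h.le
      have hne : (a == (x :: xs).foldl max a) = false := by
        rw [hM, hmax]; simp; omega
      rw [List.filter_cons]
      simp only [hne, Bool.false_eq_true, if_false]
      rw [show ((x :: xs).foldl max a) = xs.foldl max x from hM.trans hmax]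
      rw [ih x (s + 1)]
      simp only [fIdx, if_pos h]
      push_cast; ring
    · have heq : (a == (x :: xs).foldl max a) = true := by
        rw [hM, max_eq_left (not_lt.mp h)]; simp
      rw [List.filter_cons]
      simp only [heq, if_true, List.map_cons, PySem.List.pyGet?_zero_cons, Option.getD_some]
      simp only [fIdx, if_neg h]
      simp

-- B's loop in closed form via fIdx
lemma altLoop_eq (t : List Int) : ∀ (a bi pi i : Int),
    altLoop t a bi pi i =
      if fIdx a t = 0 then (bi, pi)
      else (i + (fIdx a t : Int) - 1,
            if fIdx a (t.take (fIdx a t - 1)) = 0 then bi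
            else i + (fIdx a (t.take (fIdx a t - 1)) : Int) - 1) := by
  induction t with
  | nil => intro a bi pi i; simp [altLoop, fIdx]
  | cons x xs ih =>
    intro a bi pi i
    by_cases hax : a < x
    · -- strict increase: update
      have hxM : x ≤ xs.foldl max x := (PySem.List.le_foldl_max xs x).1
      have haM : a < xs.foldl max x := lt_of_lt_of_le hax hxM
      simp only [altLoop, if_pos hax]
      rw [ih x i bi (i + 1)]
      simp only [fIdx, if_pos haM]
      cases hfx : fIdx x xs with
      | zero =>
        simp [fIdx]
      | succ j =>
        have hxT : x ≤ (xs.take j).foldl max x := (PySem.List.le_foldl_max (xs.take j) x).1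
        simp only [Nat.add_sub_cancel, List.take_succ_cons]
        have h2 : fIdx a (x :: xs.take j) = fIdx x (xs.take j) + 1 := by
          simp only [fIdx]; rw [if_pos (lt_of_lt_of_le hax hxT)]
        rw [h2]
        cases hfj : fIdx x (xs.take j) with
        | zero => simp [hfj, Prod.ext_iff]; push_cast; omega
        | succ c =>
          rw [if_neg (by omega : ¬ j + 1 + 1 = 0), if_neg (by omega : ¬ c + 1 = 0),
            if_neg (by omega : ¬ c + 1 + 1 = 0)]
          refine Prod.ext ?_ ?_ <;> (push_cast; ring)
    · -- no update at x
      have hxa : x ≤ a := not_lt.mp hax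
      simp only [altLoop, if_neg hax]
      rw [ih a bi pi (i + 1)]
      cases xs with
      | nil =>
        simp only [fIdx]
        simp [hax]
      | cons y ys =>
        have hc : (y :: ys).foldl max x = max x (ys.foldl max y) := by
          simpa using foldl_max_comm ys x y
        by_cases hN : a < ys.foldl max y
        · -- max is further right
          have hxN : x < ys.foldl max y := lt_of_le_of_lt hxa hN
          have hk : fIdx a (x :: y :: ys) = fIdx y ys + 1 + 1 := by
            simp only [fIdx, hc, if_pos (lt_max_iff.mpr (Or.inr hN)), if_pos hxN, if_pos hN]
          have hk2 : fIdx a (y :: ys) = fIdx y ys + 1 := by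
            simp only [fIdx, if_pos hN]
          rw [hk, hk2]
          simp only [Nat.add_sub_cancel, List.take_succ_cons]
          rw [fIdx_cons_le a x ((y :: ys).take (fIdx y ys)) hxa]
          cases hfp : fIdx a ((y :: ys).take (fIdx y ys)) with
          | zero => simp [hfp]; push_cast; ring
          | succ c =>
            rw [if_neg (by omega : ¬ c + 1 = 0), if_neg (by omega : ¬ c + 1 = 0),
              if_neg (by omega : ¬ c + 1 + 1 = 0), if_neg (by omega : ¬ fIdx y ys + 1 = 0),
              if_neg (by omega : ¬ fIdx y ys + 1 + 1 = 0)]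
            refine Prod.ext ?_ ?_ <;> (push_cast; ring)
        · -- nothing beats a
          have h1 : ¬ a < max x (ys.foldl max y) := not_lt.mpr (max_le hxa (not_lt.mp hN))
          simp only [fIdx, hc, if_neg h1, if_neg hN]
          simp

-- ===== VERDICT (by name: the statement is the Claim_ definition above) =====
theorem l_sl_value_spec : Claim_equal_l_sl_value := by
  intro li _
  unfold Spec_l_sl_value
  cases li with
  | nil => rfl
  | cons a t =>
    show l_sl_value (a :: t) = l_sl_value_alt (a :: t)
    rw [l_sl_value, l_sl_value_alt]
    simp only [PySem.List.len_eq, List.length_cons]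
    rw [if_neg (show ¬ ((t.length + 1 : Nat) : Int) = 0 by push_cast; omega)]
    simp only [PySem.List.max?_id_cons, Option.getD_some]
    rw [filter_head_eq t a 0, altLoop_eq t a 0 0 1]
    simp only [zero_add]
    cases hk : fIdx a t with
    | zero => simp
    | succ j =>
      rw [if_neg (by omega : ¬ j + 1 = 0)]
      have hsl : PySem.List.slice (a :: t) none (some ((j + 1 : Nat) : Int)) = (a :: t).take (j + 1) :=
        PySem.List.slice_to_natCast (a :: t) (j + 1)
      rw [if_neg (by push_cast; omega : ¬ ((j + 1 : Nat) : Int) = 0)]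
      rw [hsl]
      simp only [List.take_succ_cons, Nat.add_sub_cancel]
      simp only [PySem.List.max?_id_cons, Option.getD_some]
      rw [filter_head_eq (t.take j) a 0]
      simp only [zero_add]
      cases hk' : fIdx a (t.take j) with
      | zero => simp
      | succ c =>
        rw [if_neg (by omega : ¬ c + 1 = 0)]
        refine Prod.ext ?_ ?_ <;> (push_cast; ring)
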